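-- pv_equiv track=rewrite | github.com/yuting3344/PY-candy | 07.py | find_some_different
-- ===== SOURCE A (Python) =====
-- def find_some_different(numbers):
--     even_count = sum(
--         1 for num in numbers if num % 2 == 0
--     )  # 生成器表達式來統計列表中偶數
--     odd_count = len(numbers) - even_count  # 奇數 = 串列長度 - 偶數個數
--
--     if even_count == 1:
--         return next(
--             item for item in numbers if item % 2 == 0
--         )  # next 函數串列會找到可迭代物件中唯一數，無需遍歷串列
--     else:
--         return next(item for item in numbers if item % 2 != 0)
-- ===== SOURCE B (Python) =====
-- def find_some_different(numbers):
--     first_even = None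
--     first_odd = None
--     even_count = 0
--     for num in reversed(numbers):
--         if num % 2 == 0:
--             first_even = num
--             even_count += 1
--         else:
--             first_odd = num
--     if even_count == 1:
--         return first_even
--     else:
--         return first_odd
-- ===== Notes on version B (the rewrite author's own statement) =====
-- stated objective: alternative
-- what changed: A counts evens with a generator sum and then RESCANS the list with a second generator to extract the first even/odd; B makes a single backwards pass (reversed traversal) that overwrites first-even/first-odd registers and counts evens as it goes, so no element is visited twice and no second scan exists.
import Mathlib
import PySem

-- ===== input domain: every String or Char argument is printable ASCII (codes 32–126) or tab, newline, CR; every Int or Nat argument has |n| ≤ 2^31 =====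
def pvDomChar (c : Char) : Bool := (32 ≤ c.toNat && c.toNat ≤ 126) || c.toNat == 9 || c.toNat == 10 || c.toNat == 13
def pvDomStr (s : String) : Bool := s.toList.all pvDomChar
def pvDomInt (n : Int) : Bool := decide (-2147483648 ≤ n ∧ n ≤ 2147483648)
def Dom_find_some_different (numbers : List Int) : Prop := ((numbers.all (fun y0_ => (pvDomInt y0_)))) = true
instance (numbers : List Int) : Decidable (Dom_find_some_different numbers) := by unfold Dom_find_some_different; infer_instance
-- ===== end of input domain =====

-- B replaces A's count-then-rescan (two forward generator scans) with one backwards pass that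
-- overwrites first-even/first-odd registers while counting evens (alternative decomposition, same cost).
-- ===== PORT A =====
def find_some_different (numbers : List Int) : Int :=
  let even_count : Int := numbers.foldl (fun acc num => if PySem.Int.mod num 2 == 0 then acc + 1 else acc) 0
  let _odd_count : Int := numbers.length - even_count
  if even_count = 1 then
    (numbers.find? (fun item => PySem.Int.mod item 2 == 0)).getD 0   -- next(...): none = StopIteration, excluded by Pre_
  else
    (numbers.find? (fun item => PySem.Int.mod item 2 != 0)).getD 0   -- next(...): none = StopIteration, excluded by Pre_

-- ===== PORT B =====
def find_some_different_alt (numbers : List Int) : Int :=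
  let s := numbers.reverse.foldl
    (fun (acc : Option Int × Option Int × Int) num =>
      if PySem.Int.mod num 2 == 0 then (some num, acc.2.1, acc.2.2 + 1)
      else (acc.1, some num, acc.2.2))
    (none, none, 0)
  if s.2.2 = 1 then
    s.1.getD 0   -- first_even is None only outside Pre_ (Python B returns None there)
  else
    s.2.1.getD 0 -- first_odd is None only outside Pre_ (Python B returns None there)

-- ===== PRECONDITION & SPEC =====
-- Pre_ excludes exactly the inputs where A's next(...) raises StopIteration:
-- even-count ≠ 1 with no odd element (e.g. [] or [2,4]).
def Pre_find_some_different (numbers : List Int) : Prop :=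
  numbers.countP (fun num => PySem.Int.mod num 2 == 0) = 1 ∨
  (numbers.any (fun num => PySem.Int.mod num 2 ≠ 0)) = true
instance (numbers : List Int) : Decidable (Pre_find_some_different numbers) := by
  unfold Pre_find_some_different; infer_instance
def pvWitness_find_some_different : List Int := [1, 2, 3]
def Spec_find_some_different (numbers : List Int) (out : Int) : Prop := out = find_some_different_alt numbers
instance (numbers : List Int) (out : Int) : Decidable (Spec_find_some_different numbers out) := by unfold Spec_find_some_different; infer_instance

-- ===== CLAIM (what is proved, stated in full; the proofs are below) =====
def Claim_equal_find_some_different : Prop := ∀ (numbers : List Int), Dom_find_some_different numbers → Pre_find_some_different numbers → Spec_find_some_different numbers (find_some_different numbers)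

-- ===== LEMMAS AND PROOFS =====

-- A's counting fold is countP
theorem pv_count_fold (p : Int → Bool) (xs : List Int) (a : Int) :
    xs.foldl (fun acc num => if p num then acc + 1 else acc) a
      = a + (xs.countP p : Int) := by
  induction xs generalizing a with
  | nil => simp
  | cons x xs ih =>
    simp only [List.foldl_cons, List.countP_cons]
    by_cases h : p x = true
    · rw [if_pos h, ih]; simp only [h, if_pos]; push_cast; ring
    · rw [if_neg h, ih]; simp [h]

-- B's backwards fold: the registers end as the last match of each parity, the counter as countP
theorem pv_rev_fold (p : Int → Bool) (ys : List Int) (e o : Option Int) (c : Int) :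
    ys.foldl
      (fun (acc : Option Int × Option Int × Int) num =>
        if p num then (some num, acc.2.1, acc.2.2 + 1)
        else (acc.1, some num, acc.2.2))
      (e, o, c)
      = ((ys.reverse.find? p).or e,
         (ys.reverse.find? (fun n => !p n)).or o,
         c + (ys.countP p : Int)) := by
  induction ys generalizing e o c with
  | nil => simp
  | cons x ys ih =>
    simp only [List.foldl_cons, List.reverse_cons, List.find?_append, List.countP_cons]
    by_cases h : p x = true
    · rw [if_pos h, ih]
      cases ys.reverse.find? p <;>
        cases ys.reverse.find? (fun n => !p n) <;>
          (simp [h]; ring)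
    · rw [if_neg h, ih]
      cases ys.reverse.find? p <;>
        cases ys.reverse.find? (fun n => !p n) <;>
          simp [h]

-- ===== VERDICT (by name: the statement is the Claim_ definition above) =====
theorem find_some_different_spec : Claim_equal_find_some_different := by
  intro numbers _dom _pre
  show find_some_different numbers = find_some_different_alt numbers
  unfold find_some_different find_some_different_alt
  rw [pv_count_fold (fun num => PySem.Int.mod num 2 == 0),
      pv_rev_fold (fun num => PySem.Int.mod num 2 == 0)]
  simp only [List.reverse_reverse, Option.or_none, List.countP_reverse, zero_add]
  have hodd : (fun n : Int => !(PySem.Int.mod n 2 == 0))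
      = (fun item : Int => PySem.Int.mod item 2 != 0) := by
    funext n; simp [bne]
  rw [hodd]
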